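-- pv_equiv track=rewrite | github.com/sajid-sarker/CSE221-Lab | Lab4/task6.py | maximumDiamonds
-- ===== SOURCE A (Python) =====
-- def flood_fill(G,  row, col):
--   #Base case
--   if row < 0 or row>=len(G) or col<0 or col>=len(G[0]) or G[row][col] == '#':
--      return 0
--
--   diamonds = 0
--
--   if G[row][col] == 'D':
--     diamonds += 1 #if D is in starting node
--
--   G[row][col] = '#' #Changes the node to set it as visited
--
--   #Checks in right, left, up, down directions respectively
--   directions = [(0, 1), (0, -1), (1, 0), (-1, 0)]
--
--   #Counts how many diamonds can be found in each direction
--   for dr, dc in directions: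
--     diamonds += flood_fill(G, row + dr, col + dc)
--
--   return diamonds
--
-- def maximumDiamonds(G):
--     maxDiamonds = 0
--     rows, cols = len(G), len(G[0])  #No. of rows and columns
--
--     for r in range(rows):
--         for c in range(cols):
--             if G[r][c] == '.':
--                 maxDiamonds = max(maxDiamonds, flood_fill(G, r, c))
--
--     return maxDiamonds
-- ===== SOURCE B (Python) =====
-- # Iterative flood fill with an explicit stack (no recursion); mutates G like A does.
-- def maximumDiamonds(G):
--     best = 0
--     for r in range(len(G)):
--         for c in range(len(G[0])):
--             if G[r][c] == '.':
--                 count = 0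
--                 stack = [(r, c)]
--                 while stack:
--                     row, col = stack.pop()
--                     if row < 0 or row >= len(G) or col < 0 or col >= len(G[0]) or G[row][col] == '#':
--                         continue
--                     if G[row][col] == 'D':
--                         count += 1
--                     G[row][col] = '#'
--                     stack.append((row - 1, col))
--                     stack.append((row + 1, col))
--                     stack.append((row, col - 1))
--                     stack.append((row, col + 1))
--                 best = max(best, count)
--     return best
-- ===== Notes on version B (the rewrite author's own statement) =====
-- stated objective: alternative
-- what changed: Replaces A's recursive flood_fill helper with an iterative depth-first flood fill using an explicit stack inside maximumDiamonds (pop a cell, skip if out of bounds or visited, count 'D', mark '#', push the four neighbours), eliminating recursion entirely.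
import Mathlib
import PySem

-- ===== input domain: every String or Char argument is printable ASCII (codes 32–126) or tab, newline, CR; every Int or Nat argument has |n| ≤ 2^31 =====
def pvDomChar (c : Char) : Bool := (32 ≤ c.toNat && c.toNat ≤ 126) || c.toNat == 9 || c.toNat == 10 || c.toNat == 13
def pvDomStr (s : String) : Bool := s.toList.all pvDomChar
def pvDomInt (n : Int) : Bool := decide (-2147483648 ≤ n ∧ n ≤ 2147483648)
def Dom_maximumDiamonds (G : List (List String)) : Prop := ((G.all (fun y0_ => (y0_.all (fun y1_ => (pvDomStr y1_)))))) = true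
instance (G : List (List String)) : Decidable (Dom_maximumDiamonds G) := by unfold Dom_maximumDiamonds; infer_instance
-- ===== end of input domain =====

-- B replaces A's recursive flood_fill by an iterative DFS with an explicit stack (marking at pop
-- time); both Pythons mutate G identically (same cells set to '#'), the theorem is about the
-- return value.

-- ===== PORT A =====

-- G[row][col]; out-of-range reads give "#" (a totalization default: every read A performs is
-- bounds-guarded and, under Pre_, the guarded cell exists, so the default is never read there).
def gridGet (G : List (List String)) (row col : Int) : String :=
  (G.getD row.toNat []).getD col.toNat "#"

-- G[row][col] = v (in range whenever A performs it; List.set is a no-op out of range)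
def gridSet (G : List (List String)) (row col : Int) (v : String) : List (List String) :=
  G.set row.toNat ((G.getD row.toNat []).set col.toNat v)

-- number of unvisited (non-"#") cells: only the fuel bound / termination measure of the ports
def unmarked (G : List (List String)) : Nat :=
  (G.map (fun row => row.countP (fun s => s != "#"))).sum

-- termination lemma cited by loopB below: marking an unvisited cell shrinks `unmarked`
theorem countP_set_lt (l : List String) (j : Nat) (h : l.getD j "#" ≠ "#") :
    (l.set j "#").countP (fun s => s != "#") < l.countP (fun s => s != "#") := by
  induction l generalizing j with
  | nil => simp [List.getD] at h
  | cons a t ih =>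
    cases j with
    | zero =>
      have ha : a ≠ "#" := by simpa [List.getD] using h
      simp [ha]
    | succ j =>
      have := ih j (by simpa [List.getD] using h)
      simp only [List.set, List.countP_cons]
      omega

theorem unmarked_set_lt (g : List (List String)) (i j : Nat)
    (h : (g.getD i []).getD j "#" ≠ "#") :
    unmarked (g.set i ((g.getD i []).set j "#")) < unmarked g := by
  induction g generalizing i with
  | nil => simp [List.getD] at h
  | cons a t ih =>
    cases i with
    | zero =>
      simp only [List.getD_cons_zero] at h
      simp only [List.getD_cons_zero, List.set_cons_zero, unmarked, List.map_cons, List.sum_cons]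
      exact Nat.add_lt_add_right (countP_set_lt a j h) _
    | succ n =>
      simp only [List.getD_cons_succ] at h
      simp only [List.getD_cons_succ, List.set_cons_succ, unmarked, List.map_cons, List.sum_cons]
      exact Nat.add_lt_add_left (ih n h) _

theorem unmarked_gridSet_lt (g : List (List String)) (row col : Int)
    (h : gridGet g row col ≠ "#") : unmarked (gridSet g row col "#") < unmarked g :=
  unmarked_set_lt g row.toNat col.toNat h

def floodF : Nat → List (List String) → Int → Int → Int × List (List String)
  | 0, g, _, _ => (0, g)
  | f + 1, g, row, col =>
    if row < 0 ∨ (g.length : Int) ≤ row ∨ col < 0 ∨ ((g.headD []).length : Int) ≤ col ∨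
        gridGet g row col = "#" then
      (0, g)
    else
      let d0 : Int := if gridGet g row col = "D" then 1 else 0
      let p1 := floodF f (gridSet g row col "#") row (col + 1)
      let p2 := floodF f p1.2 row (col - 1)
      let p3 := floodF f p2.2 (row + 1) col
      let p4 := floodF f p3.2 (row - 1) col
      (d0 + p1.1 + p2.1 + p3.1 + p4.1, p4.2)

def maximumDiamonds (G : List (List String)) : Int :=
  (List.foldl
    (fun (st : Int × List (List String)) (r : Int) =>
      List.foldl
        (fun (st : Int × List (List String)) (c : Int) =>
          if gridGet st.2 r c = "." then
            let p := floodF (unmarked st.2 + 1) st.2 r c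
            (max st.1 p.1, p.2)
          else st)
        st (PySem.List.pyRange 0 ((G.headD []).length : Int) 1))
    (0, G) (PySem.List.pyRange 0 (G.length : Int) 1)).1

-- ===== PORT B =====

-- B's while loop: pop (row,col); skip if out of bounds or visited; else count 'D', mark and push
-- the four neighbours (head of the list = top of stack, so the right neighbour is popped first)
def loopB (g : List (List String)) (stack : List (Int × Int)) (cnt : Int) :
    Int × List (List String) :=
  match stack with
  | [] => (cnt, g)
  | (row, col) :: rest =>
    if h : row < 0 ∨ (g.length : Int) ≤ row ∨ col < 0 ∨ ((g.headD []).length : Int) ≤ col ∨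
        gridGet g row col = "#" then
      loopB g rest cnt
    else
      loopB (gridSet g row col "#")
        ((row, col + 1) :: (row, col - 1) :: (row + 1, col) :: (row - 1, col) :: rest)
        (if gridGet g row col = "D" then cnt + 1 else cnt)
termination_by (unmarked g, stack.length)
decreasing_by
  · exact Prod.Lex.right _ (by simp)
  · exact Prod.Lex.left _ _ (unmarked_gridSet_lt g row col (by tauto))

def maximumDiamonds_alt (G : List (List String)) : Int :=
  (List.foldl
    (fun (st : Int × List (List String)) (r : Int) =>
      List.foldl
        (fun (st : Int × List (List String)) (c : Int) =>
          if gridGet st.2 r c = "." then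
            let p := loopB st.2 [(r, c)] 0
            (max st.1 p.1, p.2)
          else st)
        st (PySem.List.pyRange 0 ((G.headD []).length : Int) 1))
    (0, G) (PySem.List.pyRange 0 (G.length : Int) 1)).1

-- ===== PRECONDITION & SPEC =====
-- Pre_ excludes exactly the inputs where A raises IndexError: the empty grid (len(G[0])) and
-- grids with len(G[0]) > 0 having a row shorter than len(G[0]) (reached by the main scan G[r][c]).
def Pre_maximumDiamonds (G : List (List String)) : Prop :=
  G ≠ [] ∧ ∀ row ∈ G, (G.headD []).length ≤ row.length
instance (G : List (List String)) : Decidable (Pre_maximumDiamonds G) := by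
  unfold Pre_maximumDiamonds; infer_instance
def pvWitness_maximumDiamonds : List (List String) := [[".", "D"], ["D", "#"]]

def Spec_maximumDiamonds (G : List (List String)) (out : Int) : Prop := out = maximumDiamonds_alt G
instance (G : List (List String)) (out : Int) : Decidable (Spec_maximumDiamonds G out) := by
  unfold Spec_maximumDiamonds; infer_instance

-- ===== CLAIM (what is proved, stated in full; the proofs are below) =====
def Claim_equal_maximumDiamonds : Prop := ∀ (G : List (List String)), Dom_maximumDiamonds G → Pre_maximumDiamonds G → Spec_maximumDiamonds G (maximumDiamonds G)

-- ===== LEMMAS AND PROOFS =====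

-- flood_fill never unmarks a cell
theorem unmarked_floodF_le (f : Nat) :
    ∀ g row col, unmarked (floodF f g row col).2 ≤ unmarked g := by
  induction f with
  | zero => intro g row col; rw [floodF.eq_1]
  | succ f ih =>
    intro g row col
    rw [floodF.eq_2]
    split
    · exact Nat.le_refl _
    · rename_i h
      exact le_trans (ih _ _ _) (le_trans (ih _ _ _) (le_trans (ih _ _ _) (le_trans (ih _ _ _)
        (Nat.le_of_lt (unmarked_gridSet_lt g row col
          (fun hh => h (Or.inr (Or.inr (Or.inr (Or.inr hh))))))))))

-- the simulation: popping one cell and running B's loop = one recursive flood_fill, then the rest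
theorem loopB_cons (f : Nat) :
    ∀ g, unmarked g < f → ∀ (row col : Int) (st : List (Int × Int)) (cnt : Int),
      loopB g ((row, col) :: st) cnt =
        loopB (floodF f g row col).2 st (cnt + (floodF f g row col).1) := by
  induction f with
  | zero => intro g hg; exact absurd hg (Nat.not_lt_zero _)
  | succ f ih =>
    intro g hg row col st cnt
    rw [loopB.eq_2, floodF.eq_2]
    by_cases h : row < 0 ∨ ((g.length : Int)) ≤ row ∨ col < 0 ∨
        (((g.headD []).length : Int)) ≤ col ∨ gridGet g row col = "#"
    · rw [dif_pos h, if_pos h]; simp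
    · rw [dif_neg h, if_neg h]
      have hne : gridGet g row col ≠ "#" := fun hh => h (Or.inr (Or.inr (Or.inr (Or.inr hh))))
      have hlt := unmarked_gridSet_lt g row col hne
      have h1 : unmarked (gridSet g row col "#") < f := by omega
      have h2 : unmarked (floodF f (gridSet g row col "#") row (col + 1)).2 < f :=
        lt_of_le_of_lt (unmarked_floodF_le f _ _ _) h1
      have h3 : unmarked (floodF f (floodF f (gridSet g row col "#") row (col + 1)).2
          row (col - 1)).2 < f :=
        lt_of_le_of_lt (unmarked_floodF_le f _ _ _) h2
      have h4 : unmarked (floodF f (floodF f (floodF f (gridSet g row col "#") row (col + 1)).2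
          row (col - 1)).2 (row + 1) col).2 < f :=
        lt_of_le_of_lt (unmarked_floodF_le f _ _ _) h3
      rw [ih _ h1, ih _ h2, ih _ h3, ih _ h4]
      congr 1
      by_cases hD : gridGet g row col = "D" <;> simp [hD] <;> ring

theorem loopB_single (g : List (List String)) (r c : Int) :
    loopB g [(r, c)] 0 = floodF (unmarked g + 1) g r c := by
  rw [loopB_cons (unmarked g + 1) g (Nat.lt_succ_self _), loopB.eq_1, zero_add]

-- ===== VERDICT (by name: the statement is the Claim_ definition above) =====
theorem maximumDiamonds_spec : Claim_equal_maximumDiamonds := by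
  intro G _ _
  unfold Spec_maximumDiamonds maximumDiamonds maximumDiamonds_alt
  congr 2
  funext st r
  congr 1
  funext st c
  by_cases hdot : gridGet st.2 r c = "."
  · simp only [if_pos hdot, loopB_single]
  · simp [hdot]
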